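-- pv_equiv track=rewrite | github.com/EpicGuy4000/advent-of-code | 2024/day_02/__init__.py | part_1
-- ===== SOURCE A (Python) =====
-- def part_1(reports: list[list[int]]) -> int:
--     safe_counter = 0
--
--     for report in reports:
--         safe = True
--         direction = report[1] > report[0]
--         prev_level = report[0]
--         for level in report[1::]:
--             diff = abs(level - prev_level)
--             if (level > prev_level) != direction or diff > 3 or diff < 1:
--                 safe = False
--                 break
--             prev_level = level
--         if safe:
--             safe_counter += 1
--
--     return safe_counter
-- ===== SOURCE B (Python) =====
-- def part_1(reports: list[list[int]]) -> int:
--     def safe(report):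
--         diffs = [b - a for a, b in zip(report, report[1:])]
--         lo, hi = min(diffs), max(diffs)
--         return 1 <= lo <= hi <= 3 or -3 <= lo <= hi <= -1
--     return sum(map(safe, reports))
-- ===== Notes on version B (the rewrite author's own statement) =====
-- stated objective: alternative
-- what changed: B drops A's direction flag and early-break scan entirely: it reduces each report's difference list to its minimum and maximum and decides safety by a two-interval test (all diffs in [1,3] or in [-3,-1]), then sums the per-report booleans.
import Mathlib
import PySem

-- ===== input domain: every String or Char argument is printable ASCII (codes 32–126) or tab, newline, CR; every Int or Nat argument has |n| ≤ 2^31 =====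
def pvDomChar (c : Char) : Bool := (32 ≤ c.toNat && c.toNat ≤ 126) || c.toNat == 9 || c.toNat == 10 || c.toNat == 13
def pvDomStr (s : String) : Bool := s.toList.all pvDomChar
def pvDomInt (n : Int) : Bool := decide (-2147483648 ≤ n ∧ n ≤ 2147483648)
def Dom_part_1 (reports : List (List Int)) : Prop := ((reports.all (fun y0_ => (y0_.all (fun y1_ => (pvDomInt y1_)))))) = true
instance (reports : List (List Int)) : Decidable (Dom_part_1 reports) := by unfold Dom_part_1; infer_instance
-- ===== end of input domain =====

-- B replaces A's direction-flag loop with early break by a min/max aggregation of each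
-- report's difference list and a two-interval test ([1,3] or [-3,-1]); alternative, not faster.
-- Pre_ excludes reports shorter than 2 levels, on which both Pythons raise (IndexError / ValueError).


-- ===== PORT A =====
-- inner 'for level in report[1::]' with break: safe-flag loop carrying prev_level
def innerA (direction : Bool) (prev : Int) : List Int → Bool
  | [] => true
  | level :: rest =>
    if (decide (level > prev) != direction) || (level - prev).natAbs > 3 || (level - prev).natAbs < 1 then
      false
    else innerA direction level rest

def part_1 (reports : List (List Int)) : Int :=
  reports.foldl (fun safe_counter report =>
    match report with
    | r0 :: r1 :: rest =>
      -- direction = report[1] > report[0]; prev_level = report[0]; loop over report[1:]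
      if innerA (decide (r1 > r0)) r0 (r1 :: rest) then safe_counter + 1 else safe_counter
    | _ => safe_counter   -- report[1] / report[0] raises IndexError; excluded by Pre_
  ) 0

-- ===== PORT B =====
-- safe(report): interval test on min/max of the difference list
def safeB (report : List Int) : Int :=
  let diffs := (report.zip (report.drop 1)).map (fun p => p.2 - p.1)
  match PySem.List.min? diffs (fun x => x), PySem.List.max? diffs (fun x => x) with
  | some lo, some hi =>
    if (1 ≤ lo ∧ lo ≤ hi ∧ hi ≤ 3) ∨ (-3 ≤ lo ∧ lo ≤ hi ∧ hi ≤ -1) then 1 else 0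
  | _, _ => 0   -- Python's min of an empty diff list raises ValueError; excluded by Pre_

def part_1_alt (reports : List (List Int)) : Int :=
  (reports.map safeB).foldl (· + ·) 0

-- ===== PRECONDITION & SPEC =====
-- Pre_ excludes reports with fewer than 2 levels: A raises IndexError at report[1] there, and B ValueError taking min of the empty diff list.
def Pre_part_1 (reports : List (List Int)) : Prop := ∀ r ∈ reports, 2 ≤ r.length
instance (reports : List (List Int)) : Decidable (Pre_part_1 reports) := by unfold Pre_part_1; infer_instance
def pvWitness_part_1 : List (List Int) := [[1, 2, 3], [5, 1, 2]]
def Spec_part_1 (reports : List (List Int)) (out : Int) : Prop := out = part_1_alt reports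
instance (reports : List (List Int)) (out : Int) : Decidable (Spec_part_1 reports out) := by unfold Spec_part_1; infer_instance

-- ===== CLAIM (what is proved, stated in full; the proofs are below) =====
def Claim_equal_part_1 : Prop := ∀ (reports : List (List Int)), Dom_part_1 reports → Pre_part_1 reports → Spec_part_1 reports (part_1 reports)

-- ===== LEMMAS AND PROOFS =====
-- A's inner loop is the conjunction over the difference list of the sign-and-magnitude test
theorem innerA_eq_all (dir : Bool) : ∀ (rest : List Int) (prev : Int),
    innerA dir prev rest =
      (((prev :: rest).zip rest).map (fun p => p.2 - p.1)).all
        (fun d => (decide (d > 0) == dir) && 1 ≤ d.natAbs && d.natAbs ≤ 3) := by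
  intro rest
  induction rest with
  | nil => intro prev; rfl
  | cons l rest ih =>
    intro prev
    simp only [innerA, List.zip_cons_cons, List.map_cons, List.all_cons, ih l]
    cases dir <;> by_cases h1 : l > prev <;>
      by_cases h2 : (l - prev).natAbs ≤ 3 <;> by_cases h3 : 1 ≤ (l - prev).natAbs <;>
      simp [h1, h2, h3, Int.sub_pos] <;> omega

-- the sign-against-first-diff test over a nonempty diff list is the two-interval condition
theorem all_iff_intervals (d0 : Int) (ds : List Int) :
    ((d0 :: ds).all
        (fun d => (decide (d > 0) == decide (d0 > 0)) && 1 ≤ d.natAbs && d.natAbs ≤ 3)) = true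
      ↔ ((∀ d ∈ d0 :: ds, 1 ≤ d ∧ d ≤ 3) ∨ (∀ d ∈ d0 :: ds, -3 ≤ d ∧ d ≤ -1)) := by
  simp only [List.all_eq_true, Bool.and_eq_true, beq_iff_eq, decide_eq_decide,
    decide_eq_true_eq, Nat.le_iff_lt_or_eq]
  constructor
  · intro h
    by_cases h0 : d0 > 0
    · left; intro d hd; have := h d hd; omega
    · right; intro d hd; have := h d hd; omega
  · rintro (h | h) d hd
    · have h0 := h d0 (by simp)
      have hd' := h d hd
      omega
    · have h0 := h d0 (by simp)
      have hd' := h d hd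
      omega

-- ===== VERDICT (by name: the statement is the Claim_ definition above) =====
theorem part_1_spec : Claim_equal_part_1 := by
  intro reports _ hpre
  unfold Spec_part_1 part_1 part_1_alt
  rw [List.foldl_map]
  apply PySem.List.foldl_congr_mem
  intro acc r hr
  have hlen := hpre r hr
  match r with
  | [] => simp at hlen
  | [_] => simp at hlen
  | r0 :: r1 :: rest =>
    unfold safeB
    simp only [List.drop_succ_cons, List.drop_zero, List.zip_cons_cons, List.map_cons]
    rw [PySem.List.min?_id_cons, PySem.List.max?_id_cons]
    have hA := innerA_eq_all (decide (r1 > r0)) (r1 :: rest) r0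
    rw [hA]
    have hsign : decide (r1 > r0) = decide ((r1 - r0) > 0) := by
      by_cases h : r1 > r0 <;> simp [h, Int.sub_pos]
    simp only [List.zip_cons_cons, List.map_cons] at *
    set ds := ((r1 :: rest).zip rest).map (fun p => p.2 - p.1) with hds
    set d0 := r1 - r0 with hd0
    have hmin : (PySem.List.min? (d0 :: ds) fun y => y) = some (List.foldl min d0 ds) :=
      PySem.List.min?_id_cons d0 ds
    have hmax : (PySem.List.max? (d0 :: ds) fun y => y) = some (List.foldl max d0 ds) :=
      PySem.List.max?_id_cons d0 ds
    have hlo := PySem.List.min?_isMin hmin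
    have hlomem := PySem.List.min?_mem hmin
    have hhi := PySem.List.max?_isMax hmax
    have hhimem := PySem.List.max?_mem hmax
    set lo := ds.foldl min d0
    set hi := ds.foldl max d0
    have hiff : ((d0 :: ds).all
        (fun d => (decide (d > 0) == decide (d0 > 0)) && 1 ≤ d.natAbs && d.natAbs ≤ 3)) = true
        ↔ ((1 ≤ lo ∧ lo ≤ hi ∧ hi ≤ 3) ∨ (-3 ≤ lo ∧ lo ≤ hi ∧ hi ≤ -1)) := by
      rw [all_iff_intervals]
      constructor
      · rintro (h | h)
        · exact Or.inl ⟨(h lo hlomem).1, hlo hi hhimem, (h hi hhimem).2⟩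
        · exact Or.inr ⟨(h lo hlomem).1, hlo hi hhimem, (h hi hhimem).2⟩
      · rintro (⟨h1, _, h3⟩ | ⟨h1, _, h3⟩)
        · exact Or.inl (fun d hd => ⟨le_trans h1 (hlo d hd), le_trans (hhi d hd) h3⟩)
        · exact Or.inr (fun d hd => ⟨le_trans h1 (hlo d hd), le_trans (hhi d hd) h3⟩)
    rw [hsign]
    by_cases hcond : ((1 ≤ lo ∧ lo ≤ hi ∧ hi ≤ 3) ∨ (-3 ≤ lo ∧ lo ≤ hi ∧ hi ≤ -1))
    · rw [if_pos (hiff.mpr hcond), if_pos hcond]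
    · rw [if_neg (fun h => hcond (hiff.mp h)), if_neg hcond]; ring
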